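-- pv_equiv track=rewrite | github.com/Abdou-salam/L3 | atelier3/exo3.py | outputStr
-- ===== SOURCE A (Python) =====
-- def outputStr(mot:str,lpost:list)->str:
--     taille = len(mot)
--     res = ""
--     for i in range(taille):
--         if len(lpost) == 0:
--             res = res + "_ "
--         else:
--             res = res + mot[i]
--
--     return res
-- ===== SOURCE B (Python) =====
-- def outputStr(mot: str, lpost: list) -> str:
--     # closed form: the loop's branch is invariant, so the whole result is
--     # either len(mot) copies of "_ " or mot itself
--     return "_ " * len(mot) if not lpost else mot
-- ===== Notes on version B (the rewrite author's own statement) =====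
-- stated objective: simpler
-- what changed: The per-character accumulator loop is replaced by a single closed-form expression: the branch condition is loop-invariant, so the result is "_ " * len(mot) when lpost is empty and mot unchanged otherwise.
import Mathlib
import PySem

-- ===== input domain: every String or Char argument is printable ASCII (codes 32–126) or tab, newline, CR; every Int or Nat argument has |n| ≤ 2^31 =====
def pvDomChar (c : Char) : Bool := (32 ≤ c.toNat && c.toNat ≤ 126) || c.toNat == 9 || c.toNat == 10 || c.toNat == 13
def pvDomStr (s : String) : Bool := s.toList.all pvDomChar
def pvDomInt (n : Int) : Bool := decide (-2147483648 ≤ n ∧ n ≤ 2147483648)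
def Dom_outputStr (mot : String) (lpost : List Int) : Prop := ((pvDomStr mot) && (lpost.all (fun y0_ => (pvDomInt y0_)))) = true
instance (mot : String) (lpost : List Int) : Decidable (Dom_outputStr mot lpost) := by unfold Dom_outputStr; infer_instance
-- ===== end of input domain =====

-- B replaces A's per-character accumulator loop with a closed form, since the
-- loop's branch condition is invariant: "_ " repeated len(mot) times if lpost
-- is empty, else mot itself.

-- ===== PORT A =====
-- the loop body on List Char: res + "_ "  or  res + mot[i] (mot[i] ported by PySem.List.pyGet?; in-range here, so getD [] is never taken)
def outputStrGo (mot : List Char) (lpost : List Int) : List Char :=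
  (PySem.List.pyRange 0 (mot.length : Int) 1).foldl
    (fun res i =>
      if lpost.length == 0 then res ++ ('_' :: ' ' :: [])
      else res ++ (((PySem.List.pyGet? mot i).map (fun c => [c])).getD []))
    []

def outputStr (mot : String) (lpost : List Int) : String :=
  String.ofList (outputStrGo mot.toList lpost)

-- ===== PORT B =====
def outputStr_alt (mot : String) (lpost : List Int) : String :=
  if lpost.isEmpty then
    String.ofList ((List.replicate mot.toList.length ('_' :: ' ' :: [])).flatten)
  else mot

-- ===== PRECONDITION & SPEC =====
def Spec_outputStr (mot : String) (lpost : List Int) (out : String) : Prop := out = outputStr_alt mot lpost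
instance (mot : String) (lpost : List Int) (out : String) : Decidable (Spec_outputStr mot lpost out) := by unfold Spec_outputStr; infer_instance

-- ===== CLAIM (what is proved, stated in full; the proofs are below) =====
def Claim_equal_outputStr : Prop := ∀ (mot : String) (lpost : List Int), Dom_outputStr mot lpost → Spec_outputStr mot lpost (outputStr mot lpost)

-- ===== LEMMAS AND PROOFS =====

-- empty-lpost branch: each iteration appends "_ ", so the fold is acc ++ n copies of "_ "
theorem foldl_const_append (u : List Char) (l : List Int) (acc : List Char) :
    l.foldl (fun res _ => res ++ u) acc = acc ++ (List.replicate l.length u).flatten := by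
  induction l generalizing acc with
  | nil => simp
  | cons x xs ih => simp [List.foldl, ih, List.replicate, List.append_assoc]

-- nonempty-lpost branch: collecting mot[i] for i = |pre| … |pre++suf|-1 onto pre rebuilds pre ++ suf
theorem foldl_collect (suf pre : List Char) :
    (PySem.List.pyRange (pre.length : Int) ((pre ++ suf).length : Int) 1).foldl
      (fun res i => res ++ (((PySem.List.pyGet? (pre ++ suf) i).map (fun c => [c])).getD []))
      pre = pre ++ suf := by
  induction suf generalizing pre with
  | nil => simp [PySem.List.pyRange_one_eq_nil]
  | cons c cs ih =>
      rw [PySem.List.pyRange_one_cons (by simp only [List.length_append, List.length_cons]; push_cast; omega)]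
      simp only [List.foldl_cons, PySem.List.pyGet?_append_length, Option.map_some, Option.getD_some]
      have h := ih (pre ++ [c])
      simp only [List.append_assoc, List.singleton_append, List.length_append,
        List.length_singleton] at h ⊢
      have : ((pre.length : Int) + 1) = ((pre.length + 1 : Nat) : Int) := by push_cast; ring
      rw [this]
      convert h using 3

-- ===== VERDICT (by name: the statement is the Claim_ definition above) =====
theorem outputStr_spec : Claim_equal_outputStr := by
  intro mot lpost _
  unfold Spec_outputStr outputStr outputStr_alt outputStrGo
  cases lpost with
  | nil =>
      simp only [List.length_nil, List.isEmpty_nil, beq_self_eq_true, if_pos]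
      rw [foldl_const_append]
      simp [PySem.List.length_pyRange_one]
  | cons x xs =>
      simp only [List.isEmpty_cons, List.length_cons]
      have hne : ((xs.length + 1 : Nat) == 0) = false := by simp
      simp only [hne, Bool.false_eq_true, if_false]
      have h := foldl_collect mot.toList []
      simp only [List.nil_append, List.length_nil, Nat.cast_zero] at h
      rw [h, String.ofList_toList]
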